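-- pv_equiv track=rewrite | github.com/deepbsd/exercise_python | sublist-2/sublist.py | check_lists
-- ===== SOURCE A (Python) =====
-- SUBLIST = 'SUBLIST'
--
-- SUPERLIST = 'SUPERLIST'
--
-- EQUAL = 'EQUAL'
--
-- UNEQUAL = 'UNEQUAL'
--
-- def check_lists(first_list, second_list):
--
--     A, B = first_list, second_list
--
--     if A == B:
--         return EQUAL
--
--     for n in range(len(B)):
--         if A == B[n:n+len(A)]:
--             return SUBLIST
--     for n in range(len(A)):
--         if B == A[n:n+len(B)]:
--             return SUPERLIST
--     return UNEQUAL
-- ===== SOURCE B (Python) =====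
-- SUBLIST = 'SUBLIST'
-- SUPERLIST = 'SUPERLIST'
-- EQUAL = 'EQUAL'
-- UNEQUAL = 'UNEQUAL'
--
-- def _occurs(pat, text):
--     # does pat occur contiguously in text? prefix test on successive suffixes
--     while len(text) >= len(pat):
--         if text[:len(pat)] == pat:
--             return True
--         text = text[1:]
--     return False
--
-- def check_lists(first_list, second_list):
--     la, lb = len(first_list), len(second_list)
--     if la == lb:
--         return EQUAL if first_list == second_list else UNEQUAL
--     if la < lb:
--         return SUBLIST if _occurs(first_list, second_list) else UNEQUAL
--     return SUPERLIST if _occurs(second_list, first_list) else UNEQUAL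
-- ===== Notes on version B (the rewrite author's own statement) =====
-- stated objective: alternative
-- what changed: B dispatches once on the length comparison so at most one containment scan ever runs (and equality is decided only when lengths match), and tests containment by a prefix check on successive suffixes that stops as soon as the remaining text is shorter than the pattern, instead of A's equality pre-check plus two full index-sliced window loops.
import Mathlib
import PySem

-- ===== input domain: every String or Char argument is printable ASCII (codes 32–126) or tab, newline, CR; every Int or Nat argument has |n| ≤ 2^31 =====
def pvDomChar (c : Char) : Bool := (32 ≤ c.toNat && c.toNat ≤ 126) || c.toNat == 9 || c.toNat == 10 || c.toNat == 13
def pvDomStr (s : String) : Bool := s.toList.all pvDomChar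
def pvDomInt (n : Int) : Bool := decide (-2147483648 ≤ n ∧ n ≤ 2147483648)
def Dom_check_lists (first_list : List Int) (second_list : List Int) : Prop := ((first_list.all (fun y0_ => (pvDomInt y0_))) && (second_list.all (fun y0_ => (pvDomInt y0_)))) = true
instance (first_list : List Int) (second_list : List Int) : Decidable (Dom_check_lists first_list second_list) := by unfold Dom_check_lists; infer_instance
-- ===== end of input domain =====

-- B dispatches once on the length comparison so at most one containment scan runs, and tests
-- containment by a prefix check on successive suffixes instead of A's index-sliced window loops.

-- ===== PORT A =====
def check_lists (first_list : List Int) (second_list : List Int) : String :=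
  -- A, B = first_list, second_list; if A == B: return EQUAL
  if first_list = second_list then "EQUAL"
  -- for n in range(len(B)): if A == B[n:n+len(A)]: return SUBLIST
  else if (PySem.List.pyRange 0 (second_list.length : Int) 1).any
      (fun n => decide (first_list = PySem.List.slice second_list (some n) (some (n + (first_list.length : Int))))) then "SUBLIST"
  -- for n in range(len(A)): if B == A[n:n+len(B)]: return SUPERLIST
  else if (PySem.List.pyRange 0 (first_list.length : Int) 1).any
      (fun n => decide (second_list = PySem.List.slice first_list (some n) (some (n + (second_list.length : Int))))) then "SUPERLIST"
  else "UNEQUAL"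

-- ===== PORT B =====
-- _occurs: while len(text) >= len(pat): if text[:len(pat)] == pat: return True; text = text[1:]; return False
def occursIn (pat : List Int) : List Int → Bool
  | [] => pat.isEmpty
  | x :: rest =>
      if pat.length ≤ (x :: rest).length then
        (decide ((x :: rest).take pat.length = pat)) || occursIn pat rest
      else false

def check_lists_alt (first_list : List Int) (second_list : List Int) : String :=
  let la := first_list.length
  let lb := second_list.length
  if la = lb then
    if first_list = second_list then "EQUAL" else "UNEQUAL"
  else if la < lb then
    if occursIn first_list second_list then "SUBLIST" else "UNEQUAL"
  else
    if occursIn second_list first_list then "SUPERLIST" else "UNEQUAL"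

-- ===== PRECONDITION & SPEC =====
def Spec_check_lists (first_list : List Int) (second_list : List Int) (out : String) : Prop := out = check_lists_alt first_list second_list
instance (first_list : List Int) (second_list : List Int) (out : String) : Decidable (Spec_check_lists first_list second_list out) := by unfold Spec_check_lists; infer_instance

-- ===== CLAIM (what is proved, stated in full; the proofs are below) =====
def Claim_equal_check_lists : Prop := ∀ (first_list : List Int) (second_list : List Int), Dom_check_lists first_list second_list → Spec_check_lists first_list second_list (check_lists first_list second_list)

-- ===== LEMMAS AND PROOFS =====

-- B's suffix/prefix scan decides contiguous containment (List.IsInfix)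
theorem occursIn_iff (pat t : List Int) : occursIn pat t = true ↔ pat <:+: t := by
  induction t with
  | nil => simp [occursIn, List.isEmpty_iff]
  | cons x rest ih =>
      simp only [occursIn]
      by_cases h : pat.length ≤ (x :: rest).length
      · simp only [if_pos h, Bool.or_eq_true, decide_eq_true_eq, ih,
          List.infix_cons_iff, List.prefix_iff_eq_take]
        constructor
        · rintro (h1 | h2)
          · exact Or.inl h1.symm
          · exact Or.inr h2
        · rintro (h1 | h2)
          · exact Or.inl h1.symm
          · exact Or.inr h2
      · simp only [if_neg h]
        constructor
        · intro hf; exact absurd hf (by simp)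
        · intro hinf; exact absurd hinf.length_le h

-- A's range-and-slice loop, characterised as an existential over window starts
theorem scan_eq_true_iff (pat t : List Int) :
    ((PySem.List.pyRange 0 (t.length : Int) 1).any
      (fun n => decide (pat = PySem.List.slice t (some n) (some (n + (pat.length : Int)))))) = true
    ↔ ∃ k : Nat, k < t.length ∧ pat = (t.drop k).take pat.length := by
  rw [List.any_eq_true]
  constructor
  · rintro ⟨n, hn, hp⟩
    rw [PySem.List.mem_pyRange_one] at hn
    obtain ⟨h0, hlt⟩ := hn
    rw [decide_eq_true_eq] at hp
    refine ⟨n.toNat, by omega, ?_⟩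
    have hcast : n = ((n.toNat : Nat) : Int) := by omega
    rw [hcast, PySem.List.slice_natCast_add] at hp
    exact hp
  · rintro ⟨k, hk, hp⟩
    refine ⟨(k : Int), ?_, ?_⟩
    · rw [PySem.List.mem_pyRange_one]
      constructor
      · positivity
      · exact_mod_cast hk
    · rw [decide_eq_true_eq, PySem.List.slice_natCast_add]
      exact hp

-- on a nonempty text, A's window loop and B's suffix scan agree
theorem scan_eq_occursIn (pat t : List Int) (ht : t ≠ []) :
    ((PySem.List.pyRange 0 (t.length : Int) 1).any
      (fun n => decide (pat = PySem.List.slice t (some n) (some (n + (pat.length : Int)))))) = occursIn pat t := by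
  rw [Bool.eq_iff_iff, scan_eq_true_iff, occursIn_iff]
  constructor
  · rintro ⟨k, hk, hp⟩
    exact List.infix_iff_prefix_suffix.mpr
      ⟨t.drop k, by rw [hp]; exact List.take_prefix _ _, List.drop_suffix k t⟩
  · intro hinf
    obtain ⟨s, hpre, hsuf⟩ := List.infix_iff_prefix_suffix.mp hinf
    rcases s with _ | ⟨a, s'⟩
    · have hpat : pat = [] := List.prefix_nil.mp hpre
      refine ⟨0, ?_, by simp [hpat]⟩
      cases t with
      | nil => exact absurd rfl ht
      | cons _ _ => simp
    · have hlen : (a :: s').length ≤ t.length := hsuf.length_le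
      have hslen : 0 < (a :: s').length := by simp
      refine ⟨t.length - (a :: s').length, by omega, ?_⟩
      have hd : (a :: s') = t.drop (t.length - (a :: s').length) :=
        List.suffix_iff_eq_drop.mp hsuf
      rw [← hd]
      exact List.prefix_iff_eq_take.mp hpre

-- the window loop never matches a pattern longer than the text
theorem scan_false_of_lt (pat t : List Int) (h : t.length < pat.length) :
    ((PySem.List.pyRange 0 (t.length : Int) 1).any
      (fun n => decide (pat = PySem.List.slice t (some n) (some (n + (pat.length : Int)))))) = false := by
  rw [← Bool.not_eq_true, scan_eq_true_iff]
  rintro ⟨k, hk, hp⟩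
  have := congrArg List.length hp
  simp at this
  omega

-- with equal lengths and unequal lists, the window loop never matches
theorem scan_false_of_eqlen_ne (pat t : List Int) (hl : pat.length = t.length) (hne : pat ≠ t) :
    ((PySem.List.pyRange 0 (t.length : Int) 1).any
      (fun n => decide (pat = PySem.List.slice t (some n) (some (n + (pat.length : Int)))))) = false := by
  rw [← Bool.not_eq_true, scan_eq_true_iff]
  rintro ⟨k, hk, hp⟩
  rcases Nat.eq_zero_or_pos k with h0 | hp0
  · subst h0
    rw [List.drop_zero, hl, List.take_length] at hp
    exact hne hp
  · have := congrArg List.length hp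
    simp at this
    omega

-- ===== VERDICT (by name: the statement is the Claim_ definition above) =====
theorem check_lists_spec : Claim_equal_check_lists := by
  intro A B _
  unfold Spec_check_lists check_lists check_lists_alt
  by_cases heq : A = B
  · subst heq
    simp
  · rcases lt_trichotomy A.length B.length with hlt | heql | hgt
    · have hBne : B ≠ [] := by
        intro h; subst h; simp at hlt
      rw [if_neg heq, scan_eq_occursIn A B hBne, scan_false_of_lt B A hlt]
      simp [Nat.ne_of_lt hlt, hlt]
    · rw [if_neg heq, scan_false_of_eqlen_ne A B heql heq,
        scan_false_of_eqlen_ne B A heql.symm (fun h => heq h.symm)]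
      simp [heql, heq]
    · have hAne : A ≠ [] := by
        intro h; subst h; simp at hgt
      rw [if_neg heq, scan_false_of_lt A B hgt, scan_eq_occursIn B A hAne]
      simp [Nat.ne_of_gt hgt, Nat.not_lt_of_gt hgt]
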